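-- pv_equiv track=rewrite | github.com/noskule/IOS.Parser | parse.py | text_table_colhead
-- ===== SOURCE A (Python) =====
-- def text_table_colhead(colhead):
--     '''Wandelt den Tabellenkopf in Dict um { Zeichenindex : Name, ... } '''
--     stringindex = 0
--     chartype = "space"
--     col_dict = {}
--     col_index_next = 0
--     col_name_next = "space"
--     for char in colhead:
--         if char.isspace() == False:    # it's a char
--             if chartype == "space":        # wecchsel von space nach char, neuer Spaltenname
--                 col_index_next = stringindex
--                 col_name_next = ""
--             col_name_next = col_name_next + char
--             chartype = "char"
--         else:                           # itf's a space
--             if chartype == "char":          # wechsel von char nach space, ende Spaltenname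
--                 col_dict[col_index_next] = col_name_next
--
--             chartype = "space"
--         stringindex += 1
--     return col_dict
-- ===== SOURCE B (Python) =====
-- def text_table_colhead(colhead):
--     '''Wandelt den Tabellenkopf in Dict um { Zeichenindex : Name, ... } '''
--     col_dict = {}
--     n = len(colhead)
--     i = 0
--     while i < n:
--         if colhead[i].isspace():
--             i += 1
--             continue
--         start = i
--         while i < n and not colhead[i].isspace():
--             i += 1
--         if i < n:  # token is followed by whitespace; a trailing token is dropped (as in the original)
--             col_dict[start] = colhead[start:i]
--     return col_dict
-- ===== Notes on version B (the rewrite author's own statement) =====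
-- stated objective: simpler
-- what changed: Replaced the per-character state machine (chartype flag, pending name/index registers) with a two-pointer token scanner: skip a whitespace run, mark the token start, advance to its end, and commit the slice only if the token is followed by whitespace.
import Mathlib
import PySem

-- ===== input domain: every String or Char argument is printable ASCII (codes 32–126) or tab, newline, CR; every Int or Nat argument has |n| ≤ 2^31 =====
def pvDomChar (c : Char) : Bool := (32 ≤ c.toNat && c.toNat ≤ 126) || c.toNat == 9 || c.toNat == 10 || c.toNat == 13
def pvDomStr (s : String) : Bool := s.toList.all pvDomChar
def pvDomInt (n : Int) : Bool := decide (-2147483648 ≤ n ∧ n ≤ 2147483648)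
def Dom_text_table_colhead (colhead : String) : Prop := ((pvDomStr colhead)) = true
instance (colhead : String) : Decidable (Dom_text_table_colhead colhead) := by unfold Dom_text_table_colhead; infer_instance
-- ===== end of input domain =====

-- B replaces A's per-character state machine with a two-pointer token scanner (simpler decomposition).
-- String concatenation / slicing is carried as List Char (String.ofList at commit time), exact for Python's str.

-- ===== PORT A =====
-- one loop iteration of A: state = (stringindex, chartype, col_dict, col_index_next, col_name_next)
def stepA (st : Int × String × PySem.Dict Int String × Int × List Char) (c : Char) :
    Int × String × PySem.Dict Int String × Int × List Char :=
  let (i, ct, d, cin, cnn) := st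
  if PySem.Chars.isspace c = false then
    let p := if ct = "space" then (i, ([] : List Char)) else (cin, cnn)
    (i + 1, "char", d, p.1, p.2 ++ [c])
  else
    if ct = "char" then
      (i + 1, "space", d.insert cin (String.ofList cnn), cin, cnn)
    else
      (i + 1, "space", d, cin, cnn)

def text_table_colhead (colhead : String) : List (Int × String) :=
  (colhead.toList.foldl stepA (0, "space", PySem.Dict.empty, 0, "space".toList)).2.2.1.items

-- ===== PORT B =====
-- two-pointer scan: skip a space, or take a whole token (takeWhile/dropWhile = the inner while),
-- committing it only when something (whitespace) follows it
def goB : Int → List Char → List (Int × String)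
  | _, [] => []
  | i, c :: rest =>
    if PySem.Chars.isspace c then goB (i + 1) rest
    else
      let tok := (c :: rest).takeWhile (fun x => !PySem.Chars.isspace x)
      let rest' := (c :: rest).dropWhile (fun x => !PySem.Chars.isspace x)
      if rest' = [] then []
      else (i, String.ofList tok) :: goB (i + tok.length) rest'
  termination_by _ l => l.length
  decreasing_by
    · simp
    · simp only [List.dropWhile]
      have := List.length_dropWhile_le (p := fun x => !PySem.Chars.isspace x) (l := rest)
      simp_all

def text_table_colhead_alt (colhead : String) : List (Int × String) :=
  goB 0 colhead.toList

-- ===== PRECONDITION & SPEC =====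
def Spec_text_table_colhead (colhead : String) (out : List (Int × String)) : Prop := out = text_table_colhead_alt colhead
instance (colhead : String) (out : List (Int × String)) : Decidable (Spec_text_table_colhead colhead out) := by unfold Spec_text_table_colhead; infer_instance

-- ===== CLAIM (what is proved, stated in full; the proofs are below) =====
def Claim_equal_text_table_colhead : Prop := ∀ (colhead : String), Dom_text_table_colhead colhead → Spec_text_table_colhead colhead (text_table_colhead colhead)

-- ===== LEMMAS AND PROOFS =====

-- B mid-token: the token cnn has begun at index cin and the scan is at index i
def goBmid (i cin : Int) (cnn : List Char) (l : List Char) : List (Int × String) :=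
  let tok := l.takeWhile (fun x => !PySem.Chars.isspace x)
  let rest' := l.dropWhile (fun x => !PySem.Chars.isspace x)
  if rest' = [] then []
  else (cin, String.ofList (cnn ++ tok)) :: goB (i + tok.length) rest'

theorem main_invariant : ∀ (l : List Char) (i : Int) (d : PySem.Dict Int String)
    (cin : Int) (cnn : List Char),
    ((∀ p ∈ d.items, p.1 < i) →
      (l.foldl stepA (i, "space", d, cin, cnn)).2.2.1.items = d.items ++ goB i l)
    ∧ ((∀ p ∈ d.items, p.1 < cin) → cin < i →
      (l.foldl stepA (i, "char", d, cin, cnn)).2.2.1.items = d.items ++ goBmid i cin cnn l) := by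
  intro l
  induction l with
  | nil =>
    intro i d cin cnn
    constructor
    · intro _; simp [goB]
    · intro _ _; simp [goBmid]
  | cons c rest ih =>
    intro i d cin cnn
    constructor
    · intro hk
      by_cases hs : PySem.Chars.isspace c = true
      · rw [List.foldl_cons,
          show stepA (i, "space", d, cin, cnn) c = (i + 1, "space", d, cin, cnn) by
            simp [stepA, hs],
          (ih (i + 1) d cin cnn).1 (fun p hp => by have := hk p hp; omega),
          show goB i (c :: rest) = goB (i + 1) rest by rw [goB]; simp [hs]]
      · simp only [Bool.not_eq_true] at hs
        rw [List.foldl_cons,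
          show stepA (i, "space", d, cin, cnn) c = (i + 1, "char", d, i, [c]) by
            simp [stepA, hs],
          (ih (i + 1) d i [c]).2 hk (by omega)]
        congr 1
        rw [goB]
        simp only [hs, Bool.false_eq_true, goBmid, List.takeWhile, List.dropWhile,
          Bool.not_false]
        by_cases hr : rest.dropWhile (fun x => !PySem.Chars.isspace x) = []
        · simp [hr]
        · simp only [hr, reduceIte]
          rw [show i + (((c :: rest.takeWhile (fun x => !PySem.Chars.isspace x)).length : Nat) : Int)
              = i + 1 + ((rest.takeWhile (fun x => !PySem.Chars.isspace x)).length : Int) by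
            simp only [List.length_cons]; push_cast; ring]
          simp
    · intro hk hlt
      by_cases hs : PySem.Chars.isspace c = true
      · -- char → space: the pending token is committed; its key cin is fresh in d
        have hfresh : d.contains cin = false := by
          by_contra hcon
          simp only [Bool.not_eq_false] at hcon
          rw [PySem.Dict.contains_iff_mem_keys] at hcon
          simp only [PySem.Dict.keys, List.mem_map] at hcon
          obtain ⟨p, hp, hpk⟩ := hcon
          have := hk p hp; omega
        rw [List.foldl_cons,
          show stepA (i, "char", d, cin, cnn) c
              = (i + 1, "space", d.insert cin (String.ofList cnn), cin, cnn) by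
            simp [stepA, hs],
          (ih (i + 1) (d.insert cin (String.ofList cnn)) cin cnn).1 (by
            intro p hp
            rw [PySem.Dict.items_insert_of_not_contains d (String.ofList cnn) hfresh] at hp
            rcases List.mem_append.mp hp with h | h
            · have := hk p h; omega
            · simp only [List.mem_singleton] at h
              rw [h]
              show cin < i + 1
              omega),
          PySem.Dict.items_insert_of_not_contains d (String.ofList cnn) hfresh]
        simp only [goBmid, List.takeWhile, List.dropWhile, hs, Bool.not_true, List.append_assoc, List.cons_append, List.nil_append]
        rw [show goB (i + (([] : List Char).length : Int)) (c :: rest) = goB (i + 1) rest by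
          rw [show (i + (([] : List Char).length : Int)) = i by simp, goB]; simp [hs]]
        simp
      · -- still inside the token
        simp only [Bool.not_eq_true] at hs
        rw [List.foldl_cons,
          show stepA (i, "char", d, cin, cnn) c = (i + 1, "char", d, cin, cnn ++ [c]) by
            simp [stepA, hs],
          (ih (i + 1) d cin (cnn ++ [c])).2 hk (by omega)]
        congr 1
        simp only [goBmid, List.takeWhile, List.dropWhile, hs, Bool.not_false]
        by_cases hr : rest.dropWhile (fun x => !PySem.Chars.isspace x) = []
        · simp [hr]
        · simp only [hr, reduceIte]
          rw [show i + (((c :: rest.takeWhile (fun x => !PySem.Chars.isspace x)).length : Nat) : Int)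
              = i + 1 + ((rest.takeWhile (fun x => !PySem.Chars.isspace x)).length : Int) by
            simp only [List.length_cons]; push_cast; ring]
          simp

-- ===== VERDICT (by name: the statement is the Claim_ definition above) =====
theorem text_table_colhead_spec : Claim_equal_text_table_colhead := by
  intro colhead _
  unfold Spec_text_table_colhead text_table_colhead text_table_colhead_alt
  have := (main_invariant colhead.toList 0 PySem.Dict.empty 0 "space".toList).1
    (by intro p hp; simp [PySem.Dict.empty] at hp)
  rw [this]
  simp [PySem.Dict.empty]
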